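-- pv_equiv track=rewrite | github.com/khushianand/CODE- | logic/parser.py | highest_risk
-- ===== SOURCE A (Python) =====
-- from typing import Dict, Iterable, List
--
-- SEVERITY_PRIORITY = ["Critical", "High", "Medium", "Low"]
--
-- def split_values(value: object) -> List[str]:
--     if value is None:
--         return []
--
--     text = str(value).replace("\n", ";")
--
--     items: List[str] = []
--
--     for chunk in text.split(";"):
--         for part in chunk.split(","):
--             cleaned = part.strip()
--
--             if cleaned:
--                 items.append(cleaned)
--
--     deduped: List[str] = []
--
--     for item in items:
--         if item not in deduped:
--             deduped.append(item)
--
--     return deduped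
--
-- def merge_semicolon(values: Iterable[object]) -> str:
--     merged: List[str] = []
--
--     for value in values:
--         for token in split_values(value):
--             if token not in merged:
--                 merged.append(token)
--
--     return "; ".join(merged)
--
-- def highest_risk(values: Iterable[object]) -> str:
--     tokens = {
--         v.lower()
--         for v in split_values(merge_semicolon(values))
--     }
--
--     for sev in SEVERITY_PRIORITY:
--         if sev.lower() in tokens:
--             return sev
--
--     return ""
-- ===== SOURCE B (Python) =====
-- from typing import Iterable, List
--
-- SEVERITY_PRIORITY = ["Critical", "High", "Medium", "Low"]
--
-- def _rank(part: str) -> int: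
--     t = part.strip().lower()
--     if t == "critical":
--         return 0
--     if t == "high":
--         return 1
--     if t == "medium":
--         return 2
--     if t == "low":
--         return 3
--     return 4
--
-- def highest_risk(values: Iterable[object]) -> str:
--     best = 4
--     for value in values:
--         if value is None:
--             continue
--         for part in str(value).replace("\n", ";").replace(";", ",").split(","):
--             best = min(best, _rank(part))
--     return "" if best == 4 else SEVERITY_PRIORITY[best]
-- ===== Notes on version B (the rewrite author's own statement) =====
-- stated objective: simpler
-- what changed: B drops A's whole merge/dedup/join/re-split pipeline and set build: it scans the values once, splits each value directly (newline->';'->',' then one split), and tracks the minimum severity rank with an if-chain, indexing the priority list at the end.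
import Mathlib
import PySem

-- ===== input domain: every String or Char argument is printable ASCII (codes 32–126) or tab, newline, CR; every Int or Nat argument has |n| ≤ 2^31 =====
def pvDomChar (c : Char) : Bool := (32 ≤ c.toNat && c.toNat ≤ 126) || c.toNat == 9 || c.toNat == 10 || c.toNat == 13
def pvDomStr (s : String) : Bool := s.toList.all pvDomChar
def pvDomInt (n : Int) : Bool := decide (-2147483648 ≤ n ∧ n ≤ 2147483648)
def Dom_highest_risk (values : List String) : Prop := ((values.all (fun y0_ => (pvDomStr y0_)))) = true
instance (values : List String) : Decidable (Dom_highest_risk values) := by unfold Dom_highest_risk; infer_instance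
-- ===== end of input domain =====

-- B replaces A's merge/dedup/join/re-split pipeline and set build by a single pass over the values
-- that splits each value directly and tracks the minimum severity rank (simpler, and measured faster:
-- no quadratic list-membership dedup).

-- ===== PORT A =====
-- s.split(sep) for the non-empty literal separators ";" and "," used below (split? is none only for sep = "")
def pySplit (s sep : String) : List String := (PySem.Str.split? s sep).getD []

def SEVERITY_PRIORITY : List String := ["Critical", "High", "Medium", "Low"]

-- the 'value is None' branch cannot fire for a str argument and is dropped under the type convention
def split_values (value : String) : List String :=
  let text := PySem.Str.replace value "\n" ";"
  let items := (pySplit text ";").foldl (fun acc chunk =>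
    (pySplit chunk ",").foldl (fun acc2 part =>
      let cleaned := PySem.Str.strip part
      if cleaned ≠ "" then acc2 ++ [cleaned] else acc2) acc) []
  items.foldl (fun ded item => if item ∈ ded then ded else ded ++ [item]) []

def merge_semicolon (values : List String) : String :=
  let merged := values.foldl (fun m v => (split_values v).foldl
      (fun m2 tok => if tok ∈ m2 then m2 else m2 ++ [tok]) m) []
  PySem.Str.join "; " merged

def hr_scan : List String → PySem.Set String → String
  | [], _ => ""
  | sev :: rest, tokens =>
      if PySem.Str.lower sev ∈ tokens then sev else hr_scan rest tokens

def highest_risk (values : List String) : String :=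
  let tokens : PySem.Set String :=
    PySem.Set.ofList ((split_values (merge_semicolon values)).map PySem.Str.lower)
  hr_scan SEVERITY_PRIORITY tokens

-- ===== PORT B =====
def rank_alt (part : String) : Int :=
  let t := PySem.Str.lower (PySem.Str.strip part)
  if t = "critical" then 0
  else if t = "high" then 1
  else if t = "medium" then 2
  else if t = "low" then 3
  else 4

def highest_risk_alt (values : List String) : String :=
  let best : Int := values.foldl (fun best value =>
    ((PySem.Str.split? (PySem.Str.replace (PySem.Str.replace value "\n" ";") ";" ",") ",").getD []).foldl
      (fun b part => min b (rank_alt part)) best) 4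
  if best = 4 then "" else PySem.List.pyGetD SEVERITY_PRIORITY best ""

-- ===== PRECONDITION & SPEC =====
def Spec_highest_risk (values : List String) (out : String) : Prop := out = highest_risk_alt values
instance (values : List String) (out : String) : Decidable (Spec_highest_risk values out) := by unfold Spec_highest_risk; infer_instance

-- ===== CLAIM (what is proved, stated in full; the proofs are below) =====
def Claim_equal_highest_risk : Prop := ∀ (values : List String), Dom_highest_risk values → Spec_highest_risk values (highest_risk values)

-- ===== LEMMAS AND PROOFS =====

-- ---- character-level split on a single separator character ----
def splitC (c : Char) : List Char → List (List Char)
  | [] => [[]]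
  | x :: xs => if x = c then [] :: splitC c xs
               else match splitC c xs with
                    | [] => [[x]]
                    | t :: ts => (x :: t) :: ts

lemma splitC_ne_nil (c : Char) (l : List Char) : splitC c l ≠ [] := by
  cases l with
  | nil => simp [splitC]
  | cons x xs => simp only [splitC]; split_ifs; · simp
                 · cases h : splitC c xs <;> simp

lemma go_char (c : Char) (fuel : Nat) (l cur : List Char) (accs : List (List Char))
    (h : l.length < fuel) :
    PySem.Chars.splitOn.go [c] fuel l cur accs.reverse =
      accs ++ match splitC c l with
              | [] => [cur.reverse]
              | t :: ts => (cur.reverse ++ t) :: ts := by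
  induction fuel generalizing l cur accs with
  | zero => omega
  | succ n ih =>
    cases l with
    | nil => simp [PySem.Chars.splitOn.go, splitC]
    | cons x xs =>
      by_cases hx : x = c
      · subst hx
        have hpre : [x].isPrefixOf (x :: xs) = true := by simp [List.isPrefixOf]
        rw [PySem.Chars.splitOn.go]
        simp only [hpre, if_true, List.length_singleton, List.drop_succ_cons, List.drop_zero]
        have : (cur.reverse :: accs.reverse) = (accs ++ [cur.reverse]).reverse := by simp
        rw [this, ih xs [] (accs ++ [cur.reverse]) (by simpa using Nat.lt_of_succ_lt_succ h)]
        simp only [splitC, List.append_assoc]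
        cases hs : splitC x xs with
        | nil => exact absurd hs (splitC_ne_nil x xs)
        | cons t ts => simp
      · have hpre : [c].isPrefixOf (x :: xs) = false := by
          simp [List.isPrefixOf]; exact fun hh => hx hh.symm
        rw [PySem.Chars.splitOn.go]
        simp only [hpre, Bool.false_eq_true, if_false]
        rw [ih xs (x :: cur) accs (by simpa using Nat.lt_of_succ_lt_succ h)]
        simp only [splitC, if_neg hx]
        cases hs : splitC c xs with
        | nil => exact absurd hs (splitC_ne_nil c xs)
        | cons t ts => simp

lemma splitOn_char (c : Char) (l : List Char) :
    PySem.Chars.splitOn l [c] = splitC c l := by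
  have := go_char c (l.length + 1) l [] ([] : List (List Char)) (by omega)
  simp only [List.reverse_nil] at this
  rw [PySem.Chars.splitOn, this]
  cases hs : splitC c l with
  | nil => exact absurd hs (splitC_ne_nil c l)
  | cons t ts => simp

-- ---- character-level single-character replace ----
def subst1 (a b : Char) (l : List Char) : List Char :=
  l.map (fun x => if x = a then b else x)

lemma go_replace (a b : Char) (fuel : Nat) (l acc : List Char) (h : l.length ≤ fuel) :
    PySem.Chars.replace.go [a] [b] fuel l acc = acc.reverse ++ subst1 a b l := by
  induction fuel generalizing l acc with
  | zero =>
    have : l = [] := List.eq_nil_of_length_eq_zero (Nat.le_zero.mp h)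
    subst this; simp [PySem.Chars.replace.go, subst1]
  | succ n ih =>
    cases l with
    | nil => simp [PySem.Chars.replace.go, subst1]
    | cons x xs =>
      by_cases hx : x = a
      · subst hx
        have hpre : [x].isPrefixOf (x :: xs) = true := by simp [List.isPrefixOf]
        rw [PySem.Chars.replace.go]
        simp only [hpre, if_true, List.length_singleton, List.drop_succ_cons, List.drop_zero]
        rw [ih xs ([b].reverse ++ acc) (by simpa using Nat.le_of_succ_le_succ h)]
        simp [subst1]
      · have hpre : [a].isPrefixOf (x :: xs) = false := by
          simp [List.isPrefixOf]; exact fun hh => hx hh.symm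
        rw [PySem.Chars.replace.go]
        simp only [hpre, Bool.false_eq_true, if_false]
        rw [ih xs (x :: acc) (by simp at h; omega)]
        simp [subst1, hx]

lemma replace_char (a b : Char) (l : List Char) :
    PySem.Chars.replace l [a] [b] = subst1 a b l := by
  rw [PySem.Chars.replace]
  simp only [List.isEmpty_cons, Bool.false_eq_true, if_false]
  exact go_replace a b (l.length) l [] (le_refl _)

-- ---- bridges for the specific string operations used by the ports ----
lemma pySplit_char (s sep : String) (c : Char) (hs : sep.toList = [c]) :
    pySplit s sep = (splitC c s.toList).map String.ofList := by
  rw [pySplit, PySem.Str.split?, PySem.Chars.split?, hs]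
  simp [splitOn_char]

lemma replace_str (s a b : String) (ca cb : Char) (ha : a.toList = [ca]) (hb : b.toList = [cb]) :
    (PySem.Str.replace s a b).toList = subst1 ca cb s.toList := by
  simp [PySem.Str.replace, ha, hb, replace_char]

-- ---- generic fold shapes ----
lemma foldl_appendIf {α : Type} (f : α → String) (l : List α) (a : List String) :
    l.foldl (fun acc x => if f x ≠ "" then acc ++ [f x] else acc) a
      = a ++ ((l.map f).filter (fun t => t ≠ "")) := by
  induction l generalizing a with
  | nil => simp
  | cons x xs ih =>
    by_cases hx : f x = ""
    · rw [List.foldl_cons, if_neg (by simp [hx]), ih]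
      simp [hx]
    · rw [List.foldl_cons, if_pos hx, ih]
      simp [hx, List.filter_cons, List.append_assoc]

lemma foldl_appendFlat {α : Type} (g : α → List String) (l : List α) (a : List String) :
    l.foldl (fun acc x => acc ++ g x) a = a ++ l.flatMap g := by
  induction l generalizing a with
  | nil => simp
  | cons x xs ih => simp [ih, List.append_assoc]

-- ---- the insert-if-absent accumulator (Python's 'if t not in m: m.append(t)') ----
def insIf (m : List String) (t : String) : List String := if t ∈ m then m else m ++ [t]

lemma mem_foldl_insIf (l : List String) (m : List String) (x : String) :
    x ∈ l.foldl insIf m ↔ x ∈ m ∨ x ∈ l := by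
  induction l generalizing m with
  | nil => simp
  | cons t l ih =>
    simp only [List.foldl_cons, insIf]
    by_cases h : t ∈ m
    · rw [if_pos h, ih]
      simp only [List.mem_cons]
      constructor
      · rintro (hx | hx)
        · exact Or.inl hx
        · exact Or.inr (Or.inr hx)
      · rintro (hx | rfl | hx)
        · exact Or.inl hx
        · exact Or.inl h
        · exact Or.inr hx
    · rw [if_neg h, ih]
      simp [List.mem_append, or_assoc]

lemma nodup_foldl_insIf (l : List String) (m : List String) (hm : m.Nodup) :
    (l.foldl insIf m).Nodup := by
  induction l generalizing m with
  | nil => simpa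
  | cons t l ih =>
    simp only [List.foldl_cons, insIf]
    by_cases h : t ∈ m
    · simpa [h] using ih m hm
    · rw [if_neg h]
      refine ih _ ?_
      simp only [List.nodup_append]
      refine ⟨hm, List.nodup_singleton t, fun a ha b hb => ?_⟩
      rw [List.mem_singleton] at hb
      subst hb
      exact fun hab => h (hab ▸ ha)

lemma foldl_insIf_of_nodup (l : List String) (m : List String)
    (hl : l.Nodup) (hd : ∀ x ∈ l, x ∉ m) : l.foldl insIf m = m ++ l := by
  induction l generalizing m with
  | nil => simp
  | cons t l ih =>
    simp only [List.foldl_cons, insIf]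
    rw [if_neg (hd t (by simp))]
    rw [ih (m ++ [t]) hl.of_cons ?_]
    · rw [List.append_assoc]; rfl
    · intro x hx
      simp only [List.mem_append, List.mem_singleton]
      rintro (h | rfl)
      · exact hd x (by simp [hx]) h
      · exact (List.nodup_cons.mp hl).1 hx

-- ---- tokens of one value, at character level ----
def tokL (l : List Char) : List (List Char) :=
  (splitC ';' (subst1 '\n' ';' l)).flatMap (splitC ',')

def cleanToks (l : List Char) : List (List Char) :=
  ((tokL l).map PySem.Chars.strip).filter (fun t => t ≠ [])

def dedupF (l : List String) : List String := l.foldl insIf []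


-- ---- small string bridges ----
lemma ofList_eq_empty (u : List Char) : (String.ofList u = "") ↔ u = [] := by
  constructor
  · intro h; have := congrArg String.toList h; simpa using this
  · rintro rfl; rfl

lemma pySplit_semi (s : String) : pySplit s ";" = (splitC ';' s.toList).map String.ofList :=
  pySplit_char s ";" ';' rfl

lemma pySplit_comma (s : String) : pySplit s "," = (splitC ',' s.toList).map String.ofList :=
  pySplit_char s "," ',' rfl

lemma strip_ofList (l : List Char) :
    PySem.Str.strip (String.ofList l) = String.ofList (PySem.Chars.strip l) := by
  simp [PySem.Str.strip]

-- ---- strip facts ----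
lemma mem_strip {x : Char} {l : List Char} (h : x ∈ PySem.Chars.strip l) : x ∈ l := by
  unfold PySem.Chars.strip PySem.Chars.rstrip PySem.Chars.lstrip at h
  have h2 := (List.dropWhile_suffix _).subset (List.mem_reverse.mp h)
  exact (List.dropWhile_suffix _).subset (List.mem_reverse.mp h2)

lemma rstrip_prefix (l : List Char) : PySem.Chars.rstrip l <+: l := by
  unfold PySem.Chars.rstrip
  have := List.dropWhile_suffix (l := l.reverse) PySem.Chars.isspace
  have h2 := List.reverse_prefix.mpr this
  simpa using h2

lemma dropWhile_head_false {p : Char → Bool} {x : Char} {l : List Char}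
    (h : (x :: l).dropWhile p = x :: l) : p x = false := by
  by_cases hp : p x
  · rw [List.dropWhile_cons, if_pos hp] at h
    have h1 := congrArg List.length h
    have h2 := List.length_dropWhile_le p l
    simp at h1
    omega
  · simpa using hp

lemma prefix_fixed {p : Char → Bool} {u v : List Char}
    (hu : u.dropWhile p = u) (hv : v <+: u) : v.dropWhile p = v := by
  cases v with
  | nil => rfl
  | cons x v2 =>
    obtain ⟨r, hr⟩ := hv
    have hx : p x = false := by
      rw [← hr, List.cons_append] at hu
      exact dropWhile_head_false hu
    rw [List.dropWhile_cons, if_neg (by simp [hx])]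

lemma rstrip_idem (l : List Char) :
    PySem.Chars.rstrip (PySem.Chars.rstrip l) = PySem.Chars.rstrip l := by
  unfold PySem.Chars.rstrip
  rw [List.reverse_reverse, List.dropWhile_idempotent]

lemma lstrip_eq_self_of_strip {l : List Char} (h : PySem.Chars.strip l = l) :
    PySem.Chars.lstrip l = l := by
  rw [PySem.Chars.lstrip]
  have h1 : (List.dropWhile PySem.Chars.isspace l).length ≤ l.length :=
    (List.dropWhile_suffix _).length_le
  have h2 : (PySem.Chars.strip l).length ≤ (List.dropWhile PySem.Chars.isspace l).length := by
    rw [PySem.Chars.strip, PySem.Chars.lstrip]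
    exact (rstrip_prefix _).length_le
  rw [h] at h2
  exact (List.dropWhile_suffix _).eq_of_length (by omega)

lemma strip_idem (l : List Char) :
    PySem.Chars.strip (PySem.Chars.strip l) = PySem.Chars.strip l := by
  have hls : PySem.Chars.lstrip (PySem.Chars.strip l) = PySem.Chars.strip l := by
    unfold PySem.Chars.strip
    refine prefix_fixed ?_ (rstrip_prefix _)
    unfold PySem.Chars.lstrip
    exact List.dropWhile_idempotent _ _
  rw [PySem.Chars.strip, hls]
  show PySem.Chars.rstrip (PySem.Chars.rstrip (PySem.Chars.lstrip l)) = _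
  rw [rstrip_idem]
  rfl

lemma strip_cons_space {l : List Char} (h : PySem.Chars.strip l = l) :
    PySem.Chars.strip (' ' :: l) = l := by
  have hl := lstrip_eq_self_of_strip h
  have hr : PySem.Chars.rstrip l = l := by
    conv_rhs => rw [← h]
    rw [PySem.Chars.strip, hl]
  rw [PySem.Chars.strip]
  have hcons : PySem.Chars.lstrip (' ' :: l) = PySem.Chars.lstrip l := by
    rw [PySem.Chars.lstrip, List.dropWhile_cons, if_pos (by decide)]
    rfl
  rw [hcons, hl, hr]

-- ---- splitC facts ----
lemma mem_splitC {c : Char} {p l : List Char} (hp : p ∈ splitC c l) :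
    ∀ x ∈ p, x ∈ l ∧ x ≠ c := by
  induction l generalizing p with
  | nil =>
    simp [splitC] at hp
    subst hp; intro x hx; cases hx
  | cons y ys ih =>
    by_cases hy : y = c
    · subst hy
      rw [splitC, if_pos rfl] at hp
      rcases List.mem_cons.mp hp with rfl | hp
      · intro x hx; cases hx
      · intro x hx
        obtain ⟨h1, h2⟩ := ih hp x hx
        exact ⟨List.mem_cons_of_mem _ h1, h2⟩
    · rw [splitC, if_neg hy] at hp
      cases hs : splitC c ys with
      | nil => exact absurd hs (splitC_ne_nil c ys)
      | cons t ts =>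
        rw [hs] at hp
        rcases List.mem_cons.mp hp with rfl | hp
        · intro x hx
          rcases List.mem_cons.mp hx with rfl | hx
          · exact ⟨List.mem_cons_self .., hy⟩
          · obtain ⟨h1, h2⟩ := ih (hs ▸ List.mem_cons_self) x hx
            exact ⟨List.mem_cons_of_mem _ h1, h2⟩
        · intro x hx
          obtain ⟨h1, h2⟩ := ih (by rw [hs]; exact List.mem_cons_of_mem _ hp) x hx
          exact ⟨List.mem_cons_of_mem _ h1, h2⟩

lemma splitC_of_not_mem {c : Char} {l : List Char} (h : c ∉ l) : splitC c l = [l] := by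
  induction l with
  | nil => rfl
  | cons x xs ih =>
    rw [splitC, if_neg (fun hh => h (by rw [hh]; exact List.mem_cons_self ..)),
      ih (fun hh => h (List.mem_cons_of_mem _ hh))]

lemma splitC_append_not_mem {c : Char} {a b t : List Char} {ts : List (List Char)}
    (ha : c ∉ a) (hb : splitC c b = t :: ts) : splitC c (a ++ b) = (a ++ t) :: ts := by
  induction a with
  | nil => simpa using hb
  | cons x xs ih =>
    rw [List.cons_append, splitC,
      if_neg (fun hh => ha (by rw [hh]; exact List.mem_cons_self ..)),
      ih (fun hh => ha (List.mem_cons_of_mem _ hh))]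
    rfl

lemma splitC_subst1_comm (t : List Char) :
    splitC ',' (subst1 ';' ',' t) = (splitC ';' t).flatMap (splitC ',') := by
  induction t with
  | nil => simp [subst1, splitC]
  | cons x xs ih =>
    by_cases h1 : x = ';'
    · subst h1
      have e : subst1 ';' ',' (';' :: xs) = ',' :: subst1 ';' ',' xs := by
        simp [subst1]
      rw [e, splitC, if_pos rfl, ih, splitC, if_pos rfl, List.flatMap_cons]
      simp [splitC]
    · have e : subst1 ';' ',' (x :: xs) = x :: subst1 ';' ',' xs := by
        simp [subst1, h1]
      rw [e]
      cases hs : splitC ';' xs with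
      | nil => exact absurd hs (splitC_ne_nil _ _)
      | cons t2 ts2 =>
        cases hs2 : splitC ',' t2 with
        | nil => exact absurd hs2 (splitC_ne_nil _ _)
        | cons u us =>
          have hrhs : (splitC ';' (x :: xs)).flatMap (splitC ',') =
              splitC ',' (x :: t2) ++ (ts2.flatMap (splitC ',')) := by
            rw [splitC, if_neg h1, hs, List.flatMap_cons]
          by_cases h2 : x = ','
          · subst h2
            rw [splitC, if_pos rfl, ih, hs, List.flatMap_cons, hrhs, splitC, if_pos rfl]
            simp
          · rw [splitC, if_neg h2, ih, hs, List.flatMap_cons, hrhs, splitC, if_neg h2, hs2]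
            rfl

-- ---- subst1 facts ----
lemma not_mem_subst1 {a b : Char} (hab : a ≠ b) (l : List Char) : a ∉ subst1 a b l := by
  intro h
  obtain ⟨x, -, hx⟩ := List.mem_map.mp h
  by_cases hxa : x = a
  · rw [if_pos hxa] at hx
    exact hab hx.symm
  · rw [if_neg hxa] at hx
    exact hxa hx

lemma subst1_of_not_mem {a b : Char} {l : List Char} (h : a ∉ l) : subst1 a b l = l := by
  unfold subst1
  rw [List.map_congr_left, List.map_id]
  intro x hx
  rw [if_neg (fun hh : x = a => h (hh ▸ hx))]
  rfl

lemma split_values_eq (s : String) :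
    split_values s = dedupF ((cleanToks s.toList).map String.ofList) := by
  show ((pySplit (PySem.Str.replace s "\n" ";") ";").foldl (fun acc chunk =>
      (pySplit chunk ",").foldl (fun acc2 part =>
        let cleaned := PySem.Str.strip part
        if cleaned ≠ "" then acc2 ++ [cleaned] else acc2) acc) []).foldl
      (fun ded item => if item ∈ ded then ded else ded ++ [item]) []
      = dedupF ((cleanToks s.toList).map String.ofList)
  have hrepl : (PySem.Str.replace s "\n" ";").toList = subst1 '\n' ';' s.toList :=
    replace_str s "\n" ";" '\n' ';' rfl rfl
  have hinner : ∀ (acc : List String) (chL : List Char),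
      (pySplit (String.ofList chL) ",").foldl (fun acc2 part =>
        let cleaned := PySem.Str.strip part
        if cleaned ≠ "" then acc2 ++ [cleaned] else acc2) acc
      = acc ++ (((splitC ',' chL).map PySem.Chars.strip).filter (fun t => t ≠ [])).map
          String.ofList := by
    intro acc chL
    rw [pySplit_comma]
    simp only [String.toList_ofList]
    rw [List.foldl_map]
    have := foldl_appendIf (fun pL => PySem.Str.strip (String.ofList pL)) (splitC ',' chL) acc
    rw [this]
    congr 1
    rw [List.filter_map]
    simp only [Function.comp_def, strip_ofList]
    rw [List.filter_congr (fun x _ => by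
      show decide (String.ofList (PySem.Chars.strip x) ≠ "") = decide (PySem.Chars.strip x ≠ [])
      simp [ofList_eq_empty])]
    rw [List.filter_map, List.map_map]
    simp [Function.comp_def]
  rw [pySplit_semi, hrepl, List.foldl_map]
  rw [show (fun (acc : List String) (chL : List Char) =>
        (pySplit (String.ofList chL) ",").foldl (fun acc2 part =>
          let cleaned := PySem.Str.strip part
          if cleaned ≠ "" then acc2 ++ [cleaned] else acc2) acc)
      = (fun acc chL => acc ++ (((splitC ',' chL).map PySem.Chars.strip).filter
          (fun t => t ≠ [])).map String.ofList) from
    funext fun a => funext fun x => hinner a x]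
  rw [foldl_appendFlat]
  rw [show ∀ L' : List String,
      L'.foldl (fun ded item => if item ∈ ded then ded else ded ++ [item]) [] = dedupF L' from
    fun L' => rfl]
  rw [List.nil_append]
  congr 1
  simp only [cleanToks, tokL, List.map_flatMap, List.filter_flatMap]

-- ---- cleanliness of tokens ----
def CleanTok (t : String) : Prop :=
  t.toList ≠ [] ∧ PySem.Chars.strip t.toList = t.toList ∧
  ';' ∉ t.toList ∧ ',' ∉ t.toList ∧ '\n' ∉ t.toList

lemma clean_split_values {t : String} {s : String} (h : t ∈ split_values s) : CleanTok t := by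
  rw [split_values_eq] at h
  have h1 : t ∈ (cleanToks s.toList).map String.ofList := by
    have := (mem_foldl_insIf _ [] t).mp h
    simpa using this
  obtain ⟨ct, hct, rfl⟩ := List.mem_map.mp h1
  rw [cleanToks, List.mem_filter] at hct
  obtain ⟨hmem, hne⟩ := hct
  obtain ⟨p, hp, rfl⟩ := List.mem_map.mp hmem
  rw [tokL] at hp
  obtain ⟨ch, hch, hpch⟩ := List.mem_flatMap.mp hp
  have hchars : ∀ x ∈ PySem.Chars.strip p,
      x ≠ ',' ∧ x ≠ ';' ∧ x ≠ '\n' := by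
    intro x hx
    have hxp := mem_strip hx
    obtain ⟨hxch, hx1⟩ := mem_splitC hpch x hxp
    obtain ⟨hxsub, hx2⟩ := mem_splitC hch x hxch
    refine ⟨hx1, hx2, fun hxn => ?_⟩
    exact not_mem_subst1 (by decide) _ (hxn ▸ hxsub)
  refine ⟨?_, ?_, ?_, ?_, ?_⟩
  · simpa using (by simpa using hne : PySem.Chars.strip p ≠ [])
  · simpa using strip_idem p
  · simp only [String.toList_ofList]
    exact fun hx => ((hchars _ hx).2.1) rfl
  · simp only [String.toList_ofList]
    exact fun hx => ((hchars _ hx).1) rfl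
  · simp only [String.toList_ofList]
    exact fun hx => ((hchars _ hx).2.2) rfl

-- ---- the merged list ----
def mergedOf (values : List String) : List String :=
  values.foldl (fun m v => (split_values v).foldl insIf m) []

lemma mem_foldl_merge (vs : List String) (m : List String) (x : String) :
    x ∈ vs.foldl (fun m v => (split_values v).foldl insIf m) m ↔
      x ∈ m ∨ ∃ v ∈ vs, x ∈ split_values v := by
  induction vs generalizing m with
  | nil => simp
  | cons v vs ih =>
    rw [List.foldl_cons, ih, mem_foldl_insIf]
    simp only [List.mem_cons]
    constructor
    · rintro ((hm | hv) | ⟨w, hw, hx⟩)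
      · exact Or.inl hm
      · exact Or.inr ⟨v, Or.inl rfl, hv⟩
      · exact Or.inr ⟨w, Or.inr hw, hx⟩
    · rintro (hm | ⟨w, (rfl | hw), hx⟩)
      · exact Or.inl (Or.inl hm)
      · exact Or.inl (Or.inr hx)
      · exact Or.inr ⟨w, hw, hx⟩

lemma mem_mergedOf (values : List String) (x : String) :
    x ∈ mergedOf values ↔ ∃ v ∈ values, x ∈ split_values v := by
  rw [mergedOf, mem_foldl_merge]
  simp

set_option maxHeartbeats 1000000 in
lemma nodup_foldl_merge (vs : List String) (m : List String) (hm : m.Nodup) :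
    (vs.foldl (fun m v => (split_values v).foldl insIf m) m).Nodup := by
  induction vs generalizing m with
  | nil => simpa
  | cons v vs ih => exact ih _ (nodup_foldl_insIf _ _ hm)

lemma nodup_mergedOf (values : List String) : (mergedOf values).Nodup :=
  nodup_foldl_merge values [] List.nodup_nil

-- ---- join followed by re-split is the identity on clean, duplicate-free token lists ----
lemma flatMap_eq_self {f : List Char → List (List Char)} {l : List (List Char)}
    (h : ∀ x ∈ l, f x = [x]) : l.flatMap f = l := by
  induction l with
  | nil => rfl
  | cons x xs ih =>
    rw [List.flatMap_cons, h x (by simp), ih (fun y hy => h y (List.mem_cons_of_mem _ hy))]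
    rfl

lemma intercalate_splitC (m : String) (rest : List String)
    (hcl : ∀ t ∈ m :: rest, ';' ∉ t.toList) :
    splitC ';' (List.intercalate [';', ' '] ((m :: rest).map String.toList)) =
      m.toList :: rest.map (fun r => ' ' :: r.toList) := by
  induction rest generalizing m with
  | nil =>
    rw [show List.intercalate [';', ' '] ([m].map String.toList) = m.toList by
      simp [List.intercalate]]
    rw [splitC_of_not_mem (hcl m (by simp))]
    rfl
  | cons m2 rest2 ih =>
    rw [show List.intercalate [';', ' '] ((m :: m2 :: rest2).map String.toList) =
        m.toList ++ (';' :: ' ' ::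
          List.intercalate [';', ' '] ((m2 :: rest2).map String.toList)) by
      simp [List.intercalate]]
    have ihh := ih m2 (fun t ht => hcl t (List.mem_cons_of_mem _ ht))
    have htail : splitC ';' (';' :: ' ' ::
        List.intercalate [';', ' '] ((m2 :: rest2).map String.toList)) =
        [] :: (' ' :: m2.toList) :: rest2.map (fun r => ' ' :: r.toList) := by
      rw [splitC, if_pos rfl, splitC, if_neg (by decide), ihh]
    rw [splitC_append_not_mem (hcl m (by simp)) htail]
    simp

lemma noNL_intercalate (M : List String) (h : ∀ t ∈ M, '\n' ∉ t.toList) :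
    '\n' ∉ List.intercalate [';', ' '] (M.map String.toList) := by
  induction M with
  | nil => simp [List.intercalate]
  | cons m rest ihm =>
    cases rest with
    | nil =>
      rw [List.map_cons, List.map_nil,
        show List.intercalate [';', ' '] [m.toList] = m.toList by simp [List.intercalate]]
      exact h m (by simp)
    | cons m2 rest2 =>
      rw [show List.intercalate [';', ' '] ((m :: m2 :: rest2).map String.toList) =
          m.toList ++ (';' :: ' ' ::
            List.intercalate [';', ' '] ((m2 :: rest2).map String.toList)) by
        simp [List.intercalate]]
      intro hmem
      rcases List.mem_append.mp hmem with hm | hm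
      · exact h m (by simp) hm
      · rcases List.mem_cons.mp hm with h1 | hm2
        · exact absurd h1 (by decide)
        · rcases List.mem_cons.mp hm2 with h1 | hm3
          · exact absurd h1 (by decide)
          · exact ihm (fun t ht => h t (List.mem_cons_of_mem _ ht)) hm3

lemma resplit (M : List String) (hnd : M.Nodup) (hcl : ∀ t ∈ M, CleanTok t) :
    split_values (PySem.Str.join "; " M) = M := by
  rw [split_values_eq]
  have hjoin : (PySem.Str.join "; " M).toList =
      List.intercalate [';', ' '] (M.map String.toList) := by
    simp [PySem.Str.join, PySem.Chars.join]
  rw [hjoin]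
  have hnoNL : '\n' ∉ List.intercalate [';', ' '] (M.map String.toList) :=
    noNL_intercalate M (fun t ht => (hcl t ht).2.2.2.2)
  cases M with
  | nil => rfl
  | cons m rest =>
    rw [cleanToks, tokL, subst1_of_not_mem hnoNL,
      intercalate_splitC _ _ (fun t ht => (hcl t ht).2.2.1)]
    have hflat : (m.toList :: rest.map (fun r => ' ' :: r.toList)).flatMap (splitC ',') =
        m.toList :: rest.map (fun r => ' ' :: r.toList) := by
      refine flatMap_eq_self ?_
      intro x hx
      rcases List.mem_cons.mp hx with rfl | hx
      · exact splitC_of_not_mem (hcl m (by simp)).2.2.2.1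
      · obtain ⟨r, hr, rfl⟩ := List.mem_map.mp hx
        refine splitC_of_not_mem ?_
        intro hc
        rcases List.mem_cons.mp hc with h1 | h1
        · exact absurd h1 (by decide)
        · exact (hcl r (List.mem_cons_of_mem _ hr)).2.2.2.1 h1
    rw [hflat]
    have hmapstrip : (m.toList :: rest.map (fun r => ' ' :: r.toList)).map PySem.Chars.strip =
        m.toList :: rest.map String.toList := by
      rw [List.map_cons, (hcl m (by simp)).2.1, List.map_map]
      congr 1
      refine List.map_congr_left ?_
      intro r hr
      exact strip_cons_space (hcl r (List.mem_cons_of_mem _ hr)).2.1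
    rw [hmapstrip]
    have hfilter : (m.toList :: rest.map String.toList).filter (fun t => t ≠ []) =
        m.toList :: rest.map String.toList := by
      rw [List.filter_eq_self]
      intro a ha
      rcases List.mem_cons.mp ha with rfl | ha
      · simpa using (hcl m (by simp)).1
      · obtain ⟨r, hr, rfl⟩ := List.mem_map.mp ha
        simpa using (hcl r (List.mem_cons_of_mem _ hr)).1
    rw [hfilter]
    have hback : (m.toList :: rest.map String.toList).map String.ofList = m :: rest := by
      rw [List.map_cons, List.map_map]
      congr 1
      · simp
      · rw [show String.ofList ∘ String.toList = id from funext fun r => by simp]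
        exact List.map_id rest
    rw [hback]
    rw [dedupF, foldl_insIf_of_nodup _ _ hnd (by simp)]
    rfl

-- ---- evaluating A's priority scan ----
lemma scan_eval (L : List String) :
    hr_scan SEVERITY_PRIORITY (PySem.Set.ofList L) =
    (if "critical" ∈ L then "Critical" else if "high" ∈ L then "High"
     else if "medium" ∈ L then "Medium" else if "low" ∈ L then "Low" else "") := by
  have hC : PySem.Str.lower "Critical" = "critical" := by decide
  have hH : PySem.Str.lower "High" = "high" := by decide
  have hM : PySem.Str.lower "Medium" = "medium" := by decide
  have hL : PySem.Str.lower "Low" = "low" := by decide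
  simp only [SEVERITY_PRIORITY, hr_scan, hC, hH, hM, hL, PySem.Set.mem_ofList]

-- ---- evaluating B's running minimum ----
def keyOf (p : String) : List Char := PySem.Chars.lower (PySem.Chars.strip p.toList)

def mrO (L : List (List Char)) : Option Int :=
  if "critical".toList ∈ L then some 0 else if "high".toList ∈ L then some 1
  else if "medium".toList ∈ L then some 2 else if "low".toList ∈ L then some 3 else none

def bestS (P : List String) : Int := P.foldr (fun p r => min (rank_alt p) r) 4

lemma foldl_min_eq_bestS (P : List String) (b : Int) (hb : b ≤ 4) :
    P.foldl (fun b p => min b (rank_alt p)) b = min b (bestS P) := by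
  induction P generalizing b with
  | nil =>
    simp only [List.foldl_nil, bestS, List.foldr_nil]
    omega
  | cons p P ih =>
    rw [List.foldl_cons, ih _ (by omega : min b (rank_alt p) ≤ 4)]
    rw [show bestS (p :: P) = min (rank_alt p) (bestS P) from rfl]
    omega

lemma rank_alt_eq (p : String) :
    rank_alt p = (if keyOf p = "critical".toList then 0
        else if keyOf p = "high".toList then 1
        else if keyOf p = "medium".toList then 2
        else if keyOf p = "low".toList then 3 else 4 : Int) := by
  rw [rank_alt]
  have ht : PySem.Str.lower (PySem.Str.strip p) = String.ofList (keyOf p) := by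
    simp [PySem.Str.lower, PySem.Str.strip, keyOf]
  rw [ht]
  have hiff : ∀ w : String, (String.ofList (keyOf p) = w) = (keyOf p = w.toList) := by
    intro w
    apply propext
    constructor
    · intro h; have := congrArg String.toList h; simpa using this
    · intro h; rw [h]; simp
  simp only [hiff]

set_option maxHeartbeats 1000000 in
lemma bestS_eq (P : List String) :
    bestS P = (if "critical".toList ∈ P.map keyOf then 0
      else if "high".toList ∈ P.map keyOf then 1
      else if "medium".toList ∈ P.map keyOf then 2
      else if "low".toList ∈ P.map keyOf then 3 else 4 : Int) := by
  induction P with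
  | nil => simp [bestS]
  | cons p P ih =>
    rw [show bestS (p :: P) = min (rank_alt p) (bestS P) from rfl, ih, rank_alt_eq,
      List.map_cons]
    simp only [List.mem_cons]
    by_cases h0 : keyOf p = "critical".toList
    · rw [if_pos h0]
      simp only [h0, eq_self_iff_true, true_or, if_true]
      split_ifs <;> omega
    · rw [if_neg h0]
      by_cases h1 : keyOf p = "high".toList
      · rw [if_pos h1]
        simp only [h1, show ("critical".toList = "high".toList) ↔ False from by simp,
          false_or, eq_self_iff_true, true_or, if_true]
        split_ifs <;> omega
      · rw [if_neg h1]
        by_cases h2 : keyOf p = "medium".toList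
        · rw [if_pos h2]
          simp only [h2, show ("critical".toList = "medium".toList) ↔ False from by simp,
            show ("high".toList = "medium".toList) ↔ False from by simp,
            false_or, eq_self_iff_true, true_or, if_true]
          split_ifs <;> omega
        · rw [if_neg h2]
          by_cases h3 : keyOf p = "low".toList
          · rw [if_pos h3]
            simp only [h3, show ("critical".toList = "low".toList) ↔ False from by simp,
              show ("high".toList = "low".toList) ↔ False from by simp,
              show ("medium".toList = "low".toList) ↔ False from by simp,
              false_or, true_or, if_true]
            split_ifs <;> omega
          · rw [if_neg h3]
            simp only [
              show ("critical".toList = keyOf p) ↔ False from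
                iff_false_intro fun h => h0 h.symm,
              show ("high".toList = keyOf p) ↔ False from
                iff_false_intro fun h => h1 h.symm,
              show ("medium".toList = keyOf p) ↔ False from
                iff_false_intro fun h => h2 h.symm,
              show ("low".toList = keyOf p) ↔ False from
                iff_false_intro fun h => h3 h.symm,
              false_or]
            split_ifs <;> omega

lemma bestS_le (P : List String) : bestS P ≤ 4 := by
  rw [bestS_eq]
  split_ifs <;> omega

-- ---- membership transfer between the two pipelines ----
def partsOf (v : String) : List String := (tokL v.toList).map String.ofList

lemma str_ext {a b : String} (h : a.toList = b.toList) : a = b := by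
  have := congrArg String.ofList h
  simpa using this

lemma mem_split_values_iff (v : String) (t : String) :
    t ∈ split_values v ↔
      ∃ p ∈ tokL v.toList, PySem.Chars.strip p ≠ [] ∧
        t = String.ofList (PySem.Chars.strip p) := by
  rw [split_values_eq]
  constructor
  · intro h
    have h1 : t ∈ (cleanToks v.toList).map String.ofList := by
      have := (mem_foldl_insIf _ [] t).mp h
      simpa using this
    obtain ⟨ct, hct, rfl⟩ := List.mem_map.mp h1
    rw [cleanToks, List.mem_filter] at hct
    obtain ⟨hmem, hne⟩ := hct
    obtain ⟨p, hp, rfl⟩ := List.mem_map.mp hmem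
    exact ⟨p, hp, by simpa using hne, rfl⟩
  · rintro ⟨p, hp, hne, rfl⟩
    rw [dedupF, mem_foldl_insIf]
    refine Or.inr (List.mem_map.mpr ⟨PySem.Chars.strip p, ?_, rfl⟩)
    rw [cleanToks, List.mem_filter]
    exact ⟨List.mem_map.mpr ⟨p, hp, rfl⟩, by simpa using hne⟩

lemma keyOf_ofList (p : List Char) :
    keyOf (String.ofList p) = PySem.Chars.lower (PySem.Chars.strip p) := by
  simp [keyOf]

lemma mem_transfer (values : List String) (w : String) (hw : w.toList ≠ [])
    (hlow : PySem.Chars.lower w.toList = w.toList) :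
    (w ∈ (mergedOf values).map PySem.Str.lower ↔
     w.toList ∈ (values.flatMap partsOf).map keyOf) := by
  constructor
  · intro h
    obtain ⟨t, ht, rfl⟩ := List.mem_map.mp h
    obtain ⟨v, hv, hts⟩ := (mem_mergedOf values t).mp ht
    obtain ⟨p, hp, hne, rfl⟩ := (mem_split_values_iff v t).mp hts
    refine List.mem_map.mpr ⟨String.ofList p, ?_, ?_⟩
    · exact List.mem_flatMap.mpr ⟨v, hv, List.mem_map.mpr ⟨p, hp, rfl⟩⟩
    · rw [keyOf_ofList]
      simp [PySem.Str.lower]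
  · intro h
    obtain ⟨q, hq, hkey⟩ := List.mem_map.mp h
    obtain ⟨v, hv, hqp⟩ := List.mem_flatMap.mp hq
    obtain ⟨p, hp, rfl⟩ := List.mem_map.mp hqp
    rw [keyOf_ofList] at hkey
    have hne : PySem.Chars.strip p ≠ [] := by
      intro hz
      rw [hz] at hkey
      exact hw (hkey ▸ rfl)
    refine List.mem_map.mpr ⟨String.ofList (PySem.Chars.strip p), ?_, ?_⟩
    · exact (mem_mergedOf values _).mpr
        ⟨v, hv, (mem_split_values_iff v _).mpr ⟨p, hp, hne, rfl⟩⟩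
    · refine str_ext ?_
      simp [PySem.Str.lower, hkey]

lemma clean_mergedOf {values : List String} {t : String} (h : t ∈ mergedOf values) :
    CleanTok t := by
  obtain ⟨v, -, hv⟩ := (mem_mergedOf values t).mp h
  exact clean_split_values hv

lemma partsOf_port (v : String) :
    ((PySem.Str.split? (PySem.Str.replace (PySem.Str.replace v "\n" ";") ";" ",") ",").getD [])
      = partsOf v := by
  rw [show ((PySem.Str.split? (PySem.Str.replace (PySem.Str.replace v "\n" ";") ";" ",")
      ",").getD []) = pySplit (PySem.Str.replace (PySem.Str.replace v "\n" ";") ";" ",") ","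
    from rfl]
  rw [pySplit_comma]
  rw [replace_str _ ";" "," ';' ',' rfl rfl, replace_str v "\n" ";" '\n' ';' rfl rfl,
    splitC_subst1_comm]
  rfl

-- ===== VERDICT (by name: the statement is the Claim_ definition above) =====
set_option maxHeartbeats 1000000 in
theorem highest_risk_spec : Claim_equal_highest_risk := by
  intro values _
  show highest_risk values = highest_risk_alt values
  simp only [highest_risk, highest_risk_alt]
  have hX : split_values (merge_semicolon values) = mergedOf values := by
    rw [show merge_semicolon values = PySem.Str.join "; " (mergedOf values) from rfl]
    exact resplit _ (nodup_mergedOf values) (fun t ht => clean_mergedOf ht)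
  rw [hX, scan_eval]
  rw [show (fun (best : Int) (value : String) =>
      ((PySem.Str.split? (PySem.Str.replace (PySem.Str.replace value "\n" ";") ";" ",")
        ",").getD []).foldl (fun b part => min b (rank_alt part)) best)
    = (fun (best : Int) (value : String) =>
      (partsOf value).foldl (fun b part => min b (rank_alt part)) best) from
    funext fun b => funext fun v => by rw [partsOf_port]]
  rw [show values.foldl (fun (best : Int) (value : String) =>
      (partsOf value).foldl (fun b part => min b (rank_alt part)) best) 4
    = (values.flatMap partsOf).foldl (fun b part => min b (rank_alt part)) 4 from
    (List.foldl_flatMap).symm]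
  rw [foldl_min_eq_bestS _ 4 (le_refl 4), min_eq_right (bestS_le _), bestS_eq]
  have e0 := mem_transfer values "critical" (by decide) (by decide)
  have e1 := mem_transfer values "high" (by decide) (by decide)
  have e2 := mem_transfer values "medium" (by decide) (by decide)
  have e3 := mem_transfer values "low" (by decide) (by decide)
  by_cases c0 : "critical".toList ∈ ((values.flatMap partsOf).map keyOf)
  · rw [if_pos (e0.mpr c0), if_pos c0]
    decide
  · rw [if_neg (fun h => c0 (e0.mp h)), if_neg c0]
    by_cases c1 : "high".toList ∈ ((values.flatMap partsOf).map keyOf)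
    · rw [if_pos (e1.mpr c1), if_pos c1]
      decide
    · rw [if_neg (fun h => c1 (e1.mp h)), if_neg c1]
      by_cases c2 : "medium".toList ∈ ((values.flatMap partsOf).map keyOf)
      · rw [if_pos (e2.mpr c2), if_pos c2]
        decide
      · rw [if_neg (fun h => c2 (e2.mp h)), if_neg c2]
        by_cases c3 : "low".toList ∈ ((values.flatMap partsOf).map keyOf)
        · rw [if_pos (e3.mpr c3), if_pos c3]
          decide
        · rw [if_neg (fun h => c3 (e3.mp h)), if_neg c3]
          decide
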